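-- pv_equiv track=rewrite | github.com/ariuk44/retake_exam_prep | day_24.py | isSequencedArray
-- ===== SOURCE A (Python) =====
-- def isSequencedArray(arr, m, n):
--     if len(arr) == 0:
--         return 0
--     for i in range(len(arr) - 1):
--         if arr[i] > arr[i + 1]:
--             return 0
--         if arr[i] < m or arr[i] > n:
--             return 0
--     if arr[-1] < m or arr[-1] > n:
--         return 0
--     for x in range(m, n + 1):
--         found = 0
--         for j in arr:
--             if j == x:
--                 found = 1
--         if found == 0:
--             return 0
--     return 1
-- ===== SOURCE B (Python) =====
-- def isSequencedArray(arr, m, n):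
--     if len(arr) == 0:
--         return 0
--     expected = m
--     prev = m
--     for x in arr:
--         if x < prev or x < m or x > n:
--             return 0
--         if x == expected:
--             expected += 1
--         prev = x
--     return 1 if expected == n + 1 else 0
-- ===== Notes on version B (the rewrite author's own statement) =====
-- stated objective: simpler
-- what changed: Replaces A's two phases (adjacent-pair scan plus a nested rescan of arr for every integer in [m,n]) by one forward sweep that checks sortedness/range and advances an 'expected' counter when the next required integer is met, deciding coverage at the end.
import Mathlib
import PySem

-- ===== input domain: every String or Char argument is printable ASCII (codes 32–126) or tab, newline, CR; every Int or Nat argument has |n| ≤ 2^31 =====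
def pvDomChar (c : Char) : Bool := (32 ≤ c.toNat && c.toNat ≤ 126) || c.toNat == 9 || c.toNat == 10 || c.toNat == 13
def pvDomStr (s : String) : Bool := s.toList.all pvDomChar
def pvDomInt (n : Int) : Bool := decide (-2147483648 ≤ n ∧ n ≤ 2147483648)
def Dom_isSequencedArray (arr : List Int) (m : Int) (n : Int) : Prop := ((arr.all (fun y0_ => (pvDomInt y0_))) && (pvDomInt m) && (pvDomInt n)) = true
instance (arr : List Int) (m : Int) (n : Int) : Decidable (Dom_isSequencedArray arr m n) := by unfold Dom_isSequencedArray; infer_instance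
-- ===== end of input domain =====

-- B replaces A's nested coverage rescans with a single forward sweep carrying an 'expected' counter (simpler, one pass).

-- ===== PORT A =====
-- 'for i in range(len(arr)-1)' over adjacent pairs, early 'return 0' encoded as false
def pvPairOk (m n : Int) : List Int → Bool
  | x :: y :: rest =>
      if x > y then false
      else if x < m ∨ x > n then false
      else pvPairOk m n (y :: rest)
  | _ => true

-- inner 'for j in arr: if j == x: found = 1'
def pvFindX (arr : List Int) (x : Int) : Int :=
  arr.foldl (fun found j => if j = x then 1 else found) 0

-- 'for x in range(m, n+1): … if found == 0: return 0' (range(m, n+1) is lazy: iterate x upward)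
def pvCover (arr : List Int) (x n : Int) : Int :=
  if x < n + 1 then (if pvFindX arr x = 0 then 0 else pvCover arr (x + 1) n)
  else 1
termination_by (n + 1 - x).toNat
decreasing_by omega

def isSequencedArray (arr : List Int) (m : Int) (n : Int) : Int :=
  if arr.length = 0 then 0
  else if pvPairOk m n arr = false then 0
  else
    match PySem.List.pyGet? arr (-1) with
    | none => 0  -- unreachable: arr is nonempty
    | some last =>
        if last < m ∨ last > n then 0
        else pvCover arr m n

-- ===== PORT B =====
-- one sweep carrying (expected, prev); early 'return 0' encoded as result 0
def pvAltLoop (m n : Int) : List Int → Int → Int → Int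
  | [], expected, _ => if expected = n + 1 then 1 else 0
  | x :: rest, expected, prev =>
      if x < prev ∨ x < m ∨ x > n then 0
      else pvAltLoop m n rest (if x = expected then expected + 1 else expected) x

def isSequencedArray_alt (arr : List Int) (m : Int) (n : Int) : Int :=
  if arr.length = 0 then 0 else pvAltLoop m n arr m m

-- ===== PRECONDITION & SPEC =====
def Spec_isSequencedArray (arr : List Int) (m : Int) (n : Int) (out : Int) : Prop := out = isSequencedArray_alt arr m n
instance (arr : List Int) (m : Int) (n : Int) (out : Int) : Decidable (Spec_isSequencedArray arr m n out) := by unfold Spec_isSequencedArray; infer_instance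

-- ===== CLAIM (what is proved, stated in full; the proofs are below) =====
def Claim_equal_isSequencedArray : Prop := ∀ (arr : List Int) (m : Int) (n : Int), Dom_isSequencedArray arr m n → Spec_isSequencedArray arr m n (isSequencedArray arr m n)

-- ===== LEMMAS AND PROOFS =====

-- A's sortedness-and-range gate, and its coverage predicate, as propositions
def pvOk (m n : Int) (l : List Int) : Prop :=
  List.IsChain (· ≤ ·) l ∧ ∀ x ∈ l, m ≤ x ∧ x ≤ n

def pvCov (m n : Int) (l : List Int) : Prop :=
  ∀ k : Int, m ≤ k → k ≤ n → k ∈ l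

-- the 'expected' counter of B's sweep
def pvFoldE (l : List Int) (e : Int) : Int :=
  l.foldl (fun e x => if x = e then e + 1 else e) e

theorem pvFindX_eq (x : Int) (l : List Int) (a : Int) :
    l.foldl (fun found j => if j = x then 1 else found) a = if x ∈ l then 1 else a := by
  induction l generalizing a with
  | nil => simp
  | cons h t ih =>
      by_cases hx : h = x
      · simp [List.foldl, hx, ih]
      · simp only [List.foldl, if_neg hx, ih, List.mem_cons]
        by_cases hm : x ∈ t <;> simp_all [Ne.symm hx]

theorem pvCover_eq (arr : List Int) (n : Int) (fuel : Nat) :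
    ∀ x : Int, (n + 1 - x).toNat = fuel →
      pvCover arr x n = if ∀ k : Int, x ≤ k → k ≤ n → k ∈ arr then 1 else 0 := by
  induction fuel with
  | zero =>
      intro x hx
      rw [pvCover, if_neg (by omega)]
      rw [if_pos (fun k hk1 hk2 => absurd rfl (by omega : k ≠ k))]
  | succ f ih =>
      intro x hx
      rw [pvCover, if_pos (by omega), pvFindX, pvFindX_eq, ih (x + 1) (by omega)]
      by_cases hmem : x ∈ arr
      · rw [if_neg (by simp [hmem])]
        by_cases hall : ∀ k : Int, x + 1 ≤ k → k ≤ n → k ∈ arr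
        · rw [if_pos hall, if_pos]
          intro k hk1 hk2
          rcases eq_or_lt_of_le hk1 with rfl | hk
          · exact hmem
          · exact hall k (by omega) hk2
        · rw [if_neg hall, if_neg]
          intro hc
          exact hall fun k hk1 hk2 => hc k (by omega) hk2
      · rw [if_pos (by simp [hmem]), if_neg]
        intro hc
        exact hmem (hc x le_rfl (by omega))

theorem pvPairOk_last (m n : Int) (arr : List Int) (h : arr ≠ []) :
    (pvPairOk m n arr = true ∧ ¬(arr.getLast h < m ∨ arr.getLast h > n)) ↔ pvOk m n arr := by
  induction arr with
  | nil => simp at h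
  | cons x t iht =>
      cases t with
      | nil =>
          simp only [pvPairOk, pvOk, List.getLast_singleton, List.mem_singleton,
            List.isChain_singleton]
          constructor
          · rintro ⟨-, hl⟩
            exact ⟨trivial, fun z hz => by subst hz; omega⟩
          · rintro ⟨-, hr⟩
            have := hr x rfl
            exact ⟨trivial, by omega⟩
      | cons y r =>
          have ih := iht (by simp)
          simp only [pvPairOk, pvOk]
          constructor
          · intro hpair
            obtain ⟨hpo, hlast⟩ := hpair
            rw [List.getLast_cons (by simp)] at hlast
            split_ifs at hpo with h1 h2
            have hrec := ih.mp ⟨hpo, hlast⟩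
            simp only [not_or, not_lt] at h2
            refine ⟨List.isChain_cons_cons.mpr ⟨by omega, hrec.1⟩, ?_⟩
            intro z hz
            rcases List.mem_cons.mp hz with rfl | hz
            · omega
            · exact hrec.2 z hz
          · intro hpair
            obtain ⟨hch, hrange⟩ := hpair
            have hxy := (List.isChain_cons_cons.mp hch).1
            have hx := hrange x (by simp)
            have hrec := ih.mpr ⟨(List.isChain_cons_cons.mp hch).2,
              fun z hz => hrange z (List.mem_cons_of_mem _ hz)⟩
            rw [List.getLast_cons (by simp)]
            refine ⟨?_, hrec.2⟩
            rw [if_neg (by omega), if_neg (by omega)]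
            exact hrec.1

theorem pvAltLoop_eq (m n : Int) (l : List Int) (e p : Int) :
    pvAltLoop m n l e p =
      if List.IsChain (· ≤ ·) (p :: l) ∧ (∀ x ∈ l, m ≤ x ∧ x ≤ n) then
        (if pvFoldE l e = n + 1 then 1 else 0)
      else 0 := by
  induction l generalizing e p with
  | nil => simp [pvAltLoop, pvFoldE]
  | cons x rest ih =>
      simp only [pvAltLoop]
      by_cases hc : x < p ∨ x < m ∨ x > n
      · rw [if_pos hc, if_neg]
        rintro ⟨hch, hr⟩
        have h1 := (List.isChain_cons_cons.mp hch).1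
        have h2 := hr x (by simp)
        omega
      · rw [if_neg hc, ih]
        simp only [not_or, not_lt] at hc
        refine if_congr ?_ rfl rfl
        constructor
        · rintro ⟨hch, hr⟩
          refine ⟨List.isChain_cons_cons.mpr ⟨hc.1, hch⟩, ?_⟩
          intro y hy
          rcases List.mem_cons.mp hy with rfl | hy
          · exact ⟨hc.2.1, hc.2.2⟩
          · exact hr y hy
        · rintro ⟨hch, hr⟩
          exact ⟨(List.isChain_cons_cons.mp hch).2,
            fun y hy => hr y (List.mem_cons_of_mem _ hy)⟩

theorem pvFoldE_forward (n : Int) (l : List Int) (e : Int)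
    (h : pvFoldE l e = n + 1) : ∀ k : Int, e ≤ k → k ≤ n → k ∈ l := by
  induction l generalizing e with
  | nil =>
      simp only [pvFoldE, List.foldl] at h
      intro k hk1 hk2; omega
  | cons x rest ih =>
      simp only [pvFoldE, List.foldl] at h
      intro k hk1 hk2
      by_cases hx : x = e
      · rw [if_pos hx] at h
        by_cases hke : k = e
        · simp [hke, hx]
        · exact List.mem_cons_of_mem _ (ih (e + 1) h k (by omega) hk2)
      · rw [if_neg hx] at h
        exact List.mem_cons_of_mem _ (ih e h k hk1 hk2)

theorem pvFoldE_high (n : Int) (l : List Int) (e : Int)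
    (hb : ∀ x ∈ l, x ≤ n) (he : n < e) : pvFoldE l e = e := by
  induction l with
  | nil => rfl
  | cons x rest ih =>
      have hx := hb x (by simp)
      simp only [pvFoldE, List.foldl]
      rw [if_neg (by omega)]
      exact ih (fun y hy => hb y (List.mem_cons_of_mem _ hy))

theorem pvFoldE_backward (n : Int) (l : List Int) (e : Int)
    (hs : l.Pairwise (· ≤ ·)) (hb : ∀ x ∈ l, x ≤ n) (he : e ≤ n + 1)
    (hcov : ∀ k : Int, e ≤ k → k ≤ n → k ∈ l) : pvFoldE l e = n + 1 := by
  induction l generalizing e with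
  | nil =>
      have heq : e = n + 1 := by
        by_contra hne
        exact absurd (hcov e le_rfl (by omega)) (by simp)
      simp [pvFoldE, heq]
  | cons x rest ih =>
      by_cases hen : e = n + 1
      · subst hen
        exact pvFoldE_high n _ _ hb (by omega)
      · have he' : e ≤ n := by omega
        have hmem : e ∈ x :: rest := hcov e le_rfl he'
        by_cases hx : x = e
        · simp only [pvFoldE, List.foldl, if_pos hx]
          refine ih (e + 1) hs.tail (fun y hy => hb y (List.mem_cons_of_mem _ hy)) (by omega) ?_
          intro k hk1 hk2
          rcases List.mem_cons.mp (hcov k (by omega) hk2) with rfl | hmem'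
          · omega
          · exact hmem'
        · have hxe : x < e := by
            rcases List.mem_cons.mp hmem with rfl | hmem'
            · exact absurd rfl hx
            · have := (List.pairwise_cons.mp hs).1 e hmem'
              omega
          simp only [pvFoldE, List.foldl, if_neg hx]
          refine ih e hs.tail (fun y hy => hb y (List.mem_cons_of_mem _ hy)) he ?_
          intro k hk1 hk2
          rcases List.mem_cons.mp (hcov k hk1 hk2) with rfl | hmem'
          · omega
          · exact hmem'

theorem pv_main (arr : List Int) (m n : Int) :
    isSequencedArray arr m n = isSequencedArray_alt arr m n := by
  cases arr with
  | nil => rfl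
  | cons h0 t =>
      have hne : (h0 :: t) ≠ ([] : List Int) := by simp
      have hA : isSequencedArray (h0 :: t) m n =
          (if pvPairOk m n (h0 :: t) = false then 0
           else if (h0 :: t).getLast hne < m ∨ (h0 :: t).getLast hne > n then 0
           else pvCover (h0 :: t) m n) := by
        simp only [isSequencedArray, if_neg (show ¬(h0 :: t).length = 0 by simp)]
        rw [PySem.List.pyGet?_neg_one, List.getLast?_eq_some_getLast hne]
      have hB : isSequencedArray_alt (h0 :: t) m n =
          (if List.IsChain (· ≤ ·) (m :: h0 :: t) ∧ (∀ x ∈ h0 :: t, m ≤ x ∧ x ≤ n) then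
            (if pvFoldE (h0 :: t) m = n + 1 then 1 else 0)
           else 0) := by
        simp only [isSequencedArray_alt, if_neg (show ¬(h0 :: t).length = 0 by simp)]
        exact pvAltLoop_eq m n (h0 :: t) m m
      rw [hA, hB]
      by_cases hok : pvOk m n (h0 :: t)
      · have hgate := (pvPairOk_last m n (h0 :: t) hne).mpr hok
        rw [if_neg (show ¬pvPairOk m n (h0 :: t) = false by simp [hgate.1]),
          if_neg hgate.2,
          if_pos (show List.IsChain (· ≤ ·) (m :: h0 :: t) ∧ ∀ x ∈ h0 :: t, m ≤ x ∧ x ≤ n from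
            ⟨List.isChain_cons_cons.mpr ⟨(hok.2 h0 (by simp)).1, hok.1⟩, hok.2⟩),
          pvCover_eq (h0 :: t) n (n + 1 - m).toNat m rfl]
        by_cases hcov : pvCov m n (h0 :: t)
        · rw [if_pos (show ∀ k : Int, m ≤ k → k ≤ n → k ∈ h0 :: t from hcov), if_pos (pvFoldE_backward n _ m
            (List.isChain_iff_pairwise.mp hok.1)
            (fun x hx => (hok.2 x hx).2)
            (by have := hok.2 h0 (by simp); omega)
            (fun k hk1 hk2 => hcov k hk1 hk2))]
        · rw [if_neg (show ¬∀ k : Int, m ≤ k → k ≤ n → k ∈ h0 :: t from hcov),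
            if_neg (fun hf => hcov (fun k hk1 hk2 => pvFoldE_forward n _ m hf k hk1 hk2))]
      · rw [if_neg (show ¬(List.IsChain (· ≤ ·) (m :: h0 :: t) ∧ ∀ x ∈ h0 :: t, m ≤ x ∧ x ≤ n) from
          fun hcond => hok ⟨(List.isChain_cons_cons.mp hcond.1).2, hcond.2⟩)]
        by_cases hp : pvPairOk m n (h0 :: t) = false
        · rw [if_pos hp]
        · rw [if_neg hp, if_pos]
          by_contra hlast
          have hptrue : pvPairOk m n (h0 :: t) = true := by
            revert hp; cases pvPairOk m n (h0 :: t) <;> simp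
          exact hok ((pvPairOk_last m n (h0 :: t) hne).mp ⟨hptrue, hlast⟩)

-- ===== VERDICT (by name: the statement is the Claim_ definition above) =====
theorem isSequencedArray_spec : Claim_equal_isSequencedArray := by
  intro arr m n _
  exact pv_main arr m n
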